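-- pv_equiv track=rewrite | github.com/Yang-Jianlin/python-learn | python数据结构与算法/fifth_chapter/C-5.26.py | repeat_num
-- ===== SOURCE A (Python) =====
-- def repeat_num(b, n):
--     num = {}
--     for i in range(0, len(b)):
--         total = 1
--         j = i+1
--         for j in range(j, len(b)):
--             if b[i] == b[j]:
--                 total = total + 1
--         num[str(b[i])] = total
--         if total == n:
--             break
--
--     return num
-- ===== SOURCE B (Python) =====
-- def repeat_num(b, n):
--     remaining = {}
--     for x in b:
--         remaining[x] = remaining.get(x, 0) + 1
--     num = {}
--     for x in b:
--         total = remaining[x]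
--         num[str(x)] = total
--         remaining[x] = total - 1
--         if total == n:
--             break
--     return num
-- ===== Notes on version B (the rewrite author's own statement) =====
-- stated objective: faster
-- what changed: B replaces the nested forward-scan (count of b[i] in b[i:] recomputed for every i) by one counting pass building a dict of total multiplicities, then a single left-to-right pass that reads and decrements the counter, keeping the same early break when the count equals n.
import Mathlib
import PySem

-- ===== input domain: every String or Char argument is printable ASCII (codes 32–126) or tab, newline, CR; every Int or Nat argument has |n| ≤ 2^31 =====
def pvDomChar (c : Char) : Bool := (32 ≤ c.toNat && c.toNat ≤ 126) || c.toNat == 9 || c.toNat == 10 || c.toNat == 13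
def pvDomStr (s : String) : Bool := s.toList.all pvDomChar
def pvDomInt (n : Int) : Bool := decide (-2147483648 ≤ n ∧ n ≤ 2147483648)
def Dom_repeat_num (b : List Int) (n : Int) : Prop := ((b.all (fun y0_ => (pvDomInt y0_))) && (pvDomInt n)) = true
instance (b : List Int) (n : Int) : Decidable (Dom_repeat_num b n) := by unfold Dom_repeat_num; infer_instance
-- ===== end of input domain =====

-- B replaces A's quadratic nested forward scan by one counting pass plus one
-- decrementing pass with the same early break; A = B is proved on all inputs.

-- ===== PORT A =====
-- outer 'for i in range(0, len(b))' with early 'break', as recursion on i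
def repeatA_go (b : List Int) (n : Int) (i : Nat) (num : PySem.Dict String Int) : PySem.Dict String Int :=
  if _h : i < b.length then
    -- total = 1; for j in range(i+1, len(b)): if b[i] == b[j]: total = total + 1
    let total : Int := (PySem.List.pyRange ((i : Int) + 1) (b.length : Int) 1).foldl
      (fun t j => if PySem.List.pyGetD b (i : Int) 0 == PySem.List.pyGetD b j 0 then t + 1 else t) 1
    let num' := num.insert (PySem.Int.toStr (PySem.List.pyGetD b (i : Int) 0)) total
    if total == n then num' else repeatA_go b n (i + 1) num'
  else num
termination_by b.length - i

def repeat_num (b : List Int) (n : Int) : List (String × Int) :=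
  (repeatA_go b n 0 PySem.Dict.empty).items

-- ===== PORT B =====
-- second loop of Source B: read the remaining count, record it, decrement, same break
def repeatB_go (n : Int) : List Int → PySem.Dict Int Int → PySem.Dict String Int → PySem.Dict String Int
  | [], _, num => num
  | x :: xs, rem, num =>
    let total := rem.getD x 0
    let num' := num.insert (PySem.Int.toStr x) total
    let rem' := rem.insert x (total - 1)
    if total == n then num' else repeatB_go n xs rem' num'

def repeat_num_alt (b : List Int) (n : Int) : List (String × Int) :=
  -- remaining[x] = remaining.get(x, 0) + 1 over b
  let remaining := b.foldl (fun d x => d.insert x (d.getD x 0 + 1)) PySem.Dict.empty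
  (repeatB_go n b remaining PySem.Dict.empty).items

-- ===== PRECONDITION & SPEC =====
def Spec_repeat_num (b : List Int) (n : Int) (out : List (String × Int)) : Prop := out = repeat_num_alt b n
instance (b : List Int) (n : Int) (out : List (String × Int)) : Decidable (Spec_repeat_num b n out) := by unfold Spec_repeat_num; infer_instance

-- ===== CLAIM (what is proved, stated in full; the proofs are below) =====
def Claim_equal_repeat_num : Prop := ∀ (b : List Int) (n : Int), Dom_repeat_num b n → Spec_repeat_num b n (repeat_num b n)

-- ===== LEMMAS AND PROOFS =====

-- A's inner loop is 1 + (multiplicity of b[i] in the strict forward suffix)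
lemma repeatA_inner (b : List Int) (i : Nat) (h : i < b.length) :
    (PySem.List.pyRange ((i : Int) + 1) (b.length : Int) 1).foldl
      (fun t j => if PySem.List.pyGetD b (i : Int) 0 == PySem.List.pyGetD b j 0 then t + 1 else t) 1
    = 1 + ((b.drop (i + 1)).count b[i] : Int) := by
  have hg : PySem.List.pyGetD b (i : Int) 0 = b[i] := by
    rw [PySem.List.pyGetD_natCast, List.getD_eq_getElem _ _ h]
  rw [PySem.List.foldl_pyRange_pyGetD' b 0
      (f := fun t y => if PySem.List.pyGetD b (i : Int) 0 == y then t + 1 else t) (init := 1) (by omega)]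
  have ht : ((i : Int) + 1).toNat = i + 1 := by omega
  rw [ht, hg]
  have heq : (fun (t : Int) (y : Int) => if (b[i] == y) then t + 1 else t)
       = (fun (t : Int) (y : Int) => if (y == b[i]) then t + 1 else t) := by
    funext t y
    by_cases hy : b[i] = y
    · simp [hy]
    · simp [beq_iff_eq, hy, Ne.symm hy]
  rw [heq, PySem.List.foldl_beq_add_one]

-- main invariant: A's loop from index i equals B's loop on the suffix, when rem
-- holds the multiplicities of each value in that suffix
lemma go_eq (b : List Int) (n : Int) :
    ∀ (k i : Nat) (rem : PySem.Dict Int Int) (num : PySem.Dict String Int),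
      b.length - i ≤ k →
      (∀ x : Int, rem.getD x 0 = ((b.drop i).count x : Int)) →
      repeatA_go b n i num = repeatB_go n (b.drop i) rem num := by
  intro k
  induction k with
  | zero =>
    intro i rem num hk _hinv
    have hle : b.length ≤ i := by omega
    rw [List.drop_eq_nil_of_le hle, repeatA_go, dif_neg (by omega)]
    rfl
  | succ k ih =>
    intro i rem num hk hinv
    by_cases h : i < b.length
    · have hg : PySem.List.pyGetD b (i : Int) 0 = b[i] := by
        rw [PySem.List.pyGetD_natCast, List.getD_eq_getElem _ _ h]
      have hdrop : b.drop i = b[i] :: b.drop (i + 1) := List.drop_eq_getElem_cons h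
      have hcnt : (1 : Int) + ((b.drop (i + 1)).count b[i] : Int) = rem.getD b[i] 0 := by
        rw [hinv b[i], hdrop]
        push_cast [List.count_cons_self]
        ring
      conv_lhs => rw [repeatA_go]
      simp only [dif_pos h]
      rw [repeatA_inner b i h, hg, hcnt, hdrop]
      simp only [repeatB_go]
      by_cases hn : rem.getD b[i] 0 = n
      · simp [hn]
      · rw [if_neg (by simpa using hn), if_neg (by simpa using hn)]
        apply ih
        · omega
        · intro x
          rw [PySem.Dict.getD_insert]
          by_cases hx : x = b[i]
          · subst hx
            rw [if_pos rfl, hinv b[i], hdrop]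
            push_cast [List.count_cons_self]
            ring
          · rw [if_neg hx, hinv x, hdrop, List.count_cons_of_ne (Ne.symm hx)]
    · have hle : b.length ≤ i := by omega
      rw [List.drop_eq_nil_of_le hle, repeatA_go, dif_neg (by omega)]
      rfl

-- ===== VERDICT (by name: the statement is the Claim_ definition above) =====
theorem repeat_num_spec : Claim_equal_repeat_num := by
  intro b n _dom
  unfold Spec_repeat_num repeat_num repeat_num_alt
  have h := go_eq b n b.length 0 (b.foldl (fun d x => d.insert x (d.getD x 0 + 1)) PySem.Dict.empty)
      PySem.Dict.empty (by omega) ?_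
  · simpa using congrArg PySem.Dict.items h
  · intro x
    rw [PySem.Dict.getD_foldl_insert_add_one]
    simp [PySem.Dict.getD_empty]
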